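-- pv_equiv track=rewrite | github.com/fkulic/advent-of-code | 2015/day8.py | part_two
-- ===== SOURCE A (Python) =====
-- def part_two(data: list[str]) -> int:
--     str_len = []
--     escaped_len = []
--     for line in data:
--         str_len.append(len(line))
--         escaped = line.replace("\\", r"\\").replace(r'"', r"\"")
--         escaped_len.append(len(escaped) + 2)
--     return sum(escaped_len) - sum(str_len)
-- ===== SOURCE B (Python) =====
-- def part_two(data: list[str]) -> int:
--     return sum(2 + line.count("\\") + line.count('"') for line in data)
-- ===== Notes on version B (the rewrite author's own statement) =====
-- stated objective: simpler
-- what changed: Instead of building each escaped string via two replace passes and subtracting summed lengths, B counts backslashes and quotes per line and sums 2 + counts directly, never constructing any string.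
import Mathlib
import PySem

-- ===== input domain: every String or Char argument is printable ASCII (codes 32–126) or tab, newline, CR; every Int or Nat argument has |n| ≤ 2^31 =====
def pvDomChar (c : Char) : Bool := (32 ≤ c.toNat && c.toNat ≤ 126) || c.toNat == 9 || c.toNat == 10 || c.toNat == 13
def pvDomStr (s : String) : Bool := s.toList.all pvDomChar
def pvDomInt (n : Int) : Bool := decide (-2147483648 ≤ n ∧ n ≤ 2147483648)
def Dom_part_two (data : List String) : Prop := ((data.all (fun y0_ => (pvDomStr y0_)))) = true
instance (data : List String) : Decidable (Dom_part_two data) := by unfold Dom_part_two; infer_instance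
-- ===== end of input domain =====

-- B computes the same total without building escaped strings: per line the overhead is 2 + #backslashes + #quotes.

-- ===== PORT A =====
def part_two (data : List String) : Int :=
  let st := data.foldl
    (fun (st : List Int × List Int) line =>
      let escaped := PySem.Str.replace (PySem.Str.replace line "\\" "\\\\") "\"" "\\\""
      (st.1 ++ [(PySem.Str.len line : Int)], st.2 ++ [(PySem.Str.len escaped : Int) + 2]))
    ([], [])
  st.2.sum - st.1.sum

-- ===== PORT B =====
def part_two_alt (data : List String) : Int :=
  (data.map (fun line => 2 + (PySem.Str.count line "\\" : Int) + (PySem.Str.count line "\"" : Int))).sum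

-- ===== PRECONDITION & SPEC =====
def Spec_part_two (data : List String) (out : Int) : Prop := out = part_two_alt data
instance (data : List String) (out : Int) : Decidable (Spec_part_two data out) := by unfold Spec_part_two; infer_instance

-- ===== CLAIM (what is proved, stated in full; the proofs are below) =====
def Claim_equal_part_two : Prop := ∀ (data : List String), Dom_part_two data → Spec_part_two data (part_two data)

-- ===== LEMMAS AND PROOFS =====

-- count.go with a single-character needle counts occurrences
theorem cnt_go (a : Char) : ∀ (fuel : Nat) (l : List Char) (acc : Nat), l.length ≤ fuel →
    PySem.Chars.count.go [a] fuel l acc = acc + l.count a := by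
  intro fuel
  induction fuel with
  | zero =>
    intro l acc h
    have hl : l = [] := List.eq_nil_of_length_eq_zero (Nat.le_zero.mp h)
    subst hl; simp [PySem.Chars.count.go]
  | succ n ih =>
    intro l acc h
    cases l with
    | nil => simp [PySem.Chars.count.go]
    | cons c t =>
      simp only [List.length_cons, Nat.succ_le_succ_iff] at h
      by_cases hc : a = c
      · subst hc
        simp only [PySem.Chars.count.go, List.isPrefixOf, BEq.rfl, Bool.true_and, if_pos]
        simp only [List.length_singleton, List.drop_one, List.tail_cons]
        rw [ih t (acc+1) h]
        simp
        omega
      · have : ([a].isPrefixOf (c :: t)) = false := by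
          simp [List.isPrefixOf, hc]
        simp only [PySem.Chars.count.go, this, Bool.false_eq_true, if_false]
        rw [ih t acc h]
        simp [Ne.symm hc]


theorem cnt (a : Char) (l : List Char) : PySem.Chars.count l [a] = l.count a := by
  simp only [PySem.Chars.count, List.isEmpty_cons, if_false, Bool.false_eq_true]
  simpa using cnt_go a l.length l 0 (le_refl _)

-- replace.go with a single-character needle is a flatMap
theorem rep_go (a : Char) (new : List Char) : ∀ (fuel : Nat) (l : List Char) (acc : List Char),
    l.length ≤ fuel →
    PySem.Chars.replace.go [a] new fuel l acc =
      acc.reverse ++ l.flatMap (fun c => if c = a then new else [c]) := by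
  intro fuel
  induction fuel with
  | zero =>
    intro l acc h
    have hl : l = [] := List.eq_nil_of_length_eq_zero (Nat.le_zero.mp h)
    subst hl; simp [PySem.Chars.replace.go]
  | succ n ih =>
    intro l acc h
    cases l with
    | nil => simp [PySem.Chars.replace.go]
    | cons c t =>
      simp only [List.length_cons, Nat.succ_le_succ_iff] at h
      by_cases hc : a = c
      · subst hc
        simp only [PySem.Chars.replace.go, List.isPrefixOf, BEq.rfl, Bool.true_and, if_pos]
        simp only [List.length_singleton, List.drop_one, List.tail_cons]
        rw [ih t (new.reverse ++ acc) h]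
        simp [List.flatMap_cons]
      · have hp : ([a].isPrefixOf (c :: t)) = false := by
          simp [List.isPrefixOf, hc]
        simp only [PySem.Chars.replace.go, hp, Bool.false_eq_true, if_false]
        rw [ih t (c :: acc) h]
        simp [List.flatMap_cons, Ne.symm hc]

theorem rep (a : Char) (new : List Char) (l : List Char) :
    PySem.Chars.replace l [a] new = l.flatMap (fun c => if c = a then new else [c]) := by
  simp only [PySem.Chars.replace, List.isEmpty_cons, if_false, Bool.false_eq_true]
  simpa using rep_go a new l.length l [] (le_refl _)

theorem flat_len (a : Char) (new : List Char) (hn : new.length = 2) (l : List Char) :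
    (l.flatMap (fun c => if c = a then new else [c])).length = l.length + l.count a := by
  induction l with
  | nil => simp
  | cons c t ih =>
    by_cases hc : c = a
    · subst hc; simp [List.flatMap_cons, ih, hn]; omega
    · simp [List.flatMap_cons, ih, hc]; omega

theorem flat_count (a b : Char) (new : List Char) (hb : b ≠ a) (hbn : b ∉ new) (l : List Char) :
    (l.flatMap (fun c => if c = a then new else [c])).count b = l.count b := by
  induction l with
  | nil => simp
  | cons c t ih =>
    by_cases hc : c = a
    · subst hc
      simp [List.flatMap_cons, Ne.symm hb, ih,
        List.count_eq_zero_of_not_mem hbn]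
    · simp [List.flatMap_cons, List.count_cons, hc, ih]

-- per-line overhead: len(escaped) + 2 - len(line) = 2 + count '\\' + count '"'
theorem line_overhead (line : String) :
    ((PySem.Str.len (PySem.Str.replace (PySem.Str.replace line "\\" "\\\\") "\"" "\\\"") : Int) + 2)
      - (PySem.Str.len line : Int)
    = 2 + (PySem.Str.count line "\\" : Int) + (PySem.Str.count line "\"" : Int) := by
  have h1 : ("\\" : String).toList = ['\\'] := rfl
  have h2 : ("\\\\" : String).toList = ['\\', '\\'] := rfl
  have h3 : ("\"" : String).toList = ['\"'] := rfl
  have h4 : ("\\\"" : String).toList = ['\\', '\"'] := rfl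
  simp only [PySem.Str.len_eq, PySem.Str.count_eq, PySem.Str.toList_replace, h1, h2, h3, h4,
    cnt, rep]
  rw [flat_len '\"' ['\\', '\"'] rfl, flat_count '\\' '\"' ['\\', '\\'] (by decide) (by decide),
    flat_len '\\' ['\\', '\\'] rfl]
  push_cast
  ring

-- the fold in A accumulates exactly B's per-line sums
theorem foldA (data : List String) : ∀ (st : List Int × List Int),
    (data.foldl
      (fun (st : List Int × List Int) line =>
        let escaped := PySem.Str.replace (PySem.Str.replace line "\\" "\\\\") "\"" "\\\""
        (st.1 ++ [(PySem.Str.len line : Int)], st.2 ++ [(PySem.Str.len escaped : Int) + 2]))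
      st).2.sum
    - (data.foldl
      (fun (st : List Int × List Int) line =>
        let escaped := PySem.Str.replace (PySem.Str.replace line "\\" "\\\\") "\"" "\\\""
        (st.1 ++ [(PySem.Str.len line : Int)], st.2 ++ [(PySem.Str.len escaped : Int) + 2]))
      st).1.sum
    = st.2.sum - st.1.sum + part_two_alt data := by
  induction data with
  | nil => intro st; simp [part_two_alt]
  | cons line rest ih =>
    intro st
    simp only [List.foldl_cons]
    rw [ih]
    simp only [part_two_alt, List.map_cons, List.sum_cons, List.sum_append, List.sum_cons,
      List.sum_nil]
    have := line_overhead line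
    omega

theorem part_two_spec : Claim_equal_part_two := by
  intro data _
  unfold Spec_part_two part_two
  simpa using foldA data ([], [])
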